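-- pv_equiv track=rewrite | github.com/PStar728/Home-Made-ML | log.py | Display_Check
-- ===== SOURCE A (Python) =====
-- def Display_Check(Epoch):
--     if Epoch % 5000 == 0:
--         return True
--     while Epoch % 10 == 0:
--         Epoch //= 10
--         if (Epoch == 0):
--             break
--
--     if (Epoch in (1, 2, 5)):
--         return True
--
--     return False
-- ===== SOURCE B (Python) =====
-- def Display_Check(Epoch):
--     if Epoch % 5000 == 0:
--         return True
--     # instead of stripping trailing zeros off Epoch, generate the "round"
--     # epochs 1,2,5 x 10^k upward and test membership; 10 digits cover any
--     # 32-bit epoch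
--     p = 1
--     for _ in range(10):
--         if Epoch in (p, 2 * p, 5 * p):
--             return True
--         p *= 10
--     return False
-- ===== Notes on version B (the rewrite author's own statement) =====
-- stated objective: alternative
-- what changed: Replaces the destructive while-loop that divides Epoch by 10 to strip trailing zeros (then tests membership in (1,2,5)) with a bottom-up generate-and-test loop over the candidate round values 1,2,5 times growing powers of 10.
import Mathlib
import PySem

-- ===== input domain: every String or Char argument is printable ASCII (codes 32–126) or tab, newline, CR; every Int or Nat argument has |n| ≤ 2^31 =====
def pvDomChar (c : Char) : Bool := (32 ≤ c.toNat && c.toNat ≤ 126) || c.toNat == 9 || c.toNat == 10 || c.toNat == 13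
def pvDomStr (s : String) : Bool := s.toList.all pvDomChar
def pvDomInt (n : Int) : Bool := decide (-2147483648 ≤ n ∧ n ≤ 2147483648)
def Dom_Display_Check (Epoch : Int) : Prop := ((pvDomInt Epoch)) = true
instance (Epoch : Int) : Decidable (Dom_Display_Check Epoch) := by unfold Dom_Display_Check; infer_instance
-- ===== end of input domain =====

-- B replaces A's strip-trailing-zeros-then-compare loop by generating the round
-- candidates 1,2,5 times powers of 10 upward and testing membership.

-- ===== PORT A =====
-- the 'while Epoch % 10 == 0' loop of A (with its 'if Epoch == 0: break')
def stripLoop (e : Int) : Int :=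
  if PySem.Int.mod e 10 = 0 then
    if PySem.Int.floordiv e 10 = 0 then 0 else stripLoop (PySem.Int.floordiv e 10)
  else e
termination_by e.natAbs
decreasing_by
  rename_i h1 h2
  have hdvd : (10 : Int) ∣ e := (PySem.Int.mod_eq_zero_iff_dvd e 10).mp h1
  have hfd : PySem.Int.floordiv e 10 = e / 10 := PySem.Int.floordiv_eq_ediv_of_pos (by norm_num)
  obtain ⟨c, hc⟩ := hdvd
  have hc' : e / 10 = c := by omega
  have hcne : c ≠ 0 := by rw [hfd, hc'] at h2; exact h2
  rw [hfd, hc', hc]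
  have : (10 * c).natAbs = 10 * c.natAbs := by
    simp [Int.natAbs_mul]
  omega

def Display_Check (Epoch : Int) : Bool :=
  if PySem.Int.mod Epoch 5000 = 0 then true
  else
    let e := stripLoop Epoch
    if e = 1 ∨ e = 2 ∨ e = 5 then true else false

-- ===== PORT B =====
-- Source B's 'for _ in range(10)' loop with accumulator p
def altLoop (e : Int) : Nat → Int → Bool
  | 0, _ => false
  | n + 1, p => if e = p ∨ e = 2 * p ∨ e = 5 * p then true else altLoop e n (p * 10)

def Display_Check_alt (Epoch : Int) : Bool :=
  if PySem.Int.mod Epoch 5000 = 0 then true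
  else altLoop Epoch 10 1

-- ===== PRECONDITION & SPEC =====
def Spec_Display_Check (Epoch : Int) (out : Bool) : Prop := out = Display_Check_alt Epoch
instance (Epoch : Int) (out : Bool) : Decidable (Spec_Display_Check Epoch out) := by unfold Spec_Display_Check; infer_instance

-- ===== CLAIM (what is proved, stated in full; the proofs are below) =====
def Claim_equal_Display_Check : Prop := ∀ (Epoch : Int), Dom_Display_Check Epoch → Spec_Display_Check Epoch (Display_Check Epoch)

-- ===== LEMMAS AND PROOFS =====

-- A's loop leaves a value not divisible by 10 that divides e by a power of ten
theorem stripLoop_spec (e : Int) (he : e ≠ 0) :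
    ∃ k : Nat, e = stripLoop e * 10 ^ k ∧ ¬ (10 : Int) ∣ stripLoop e := by
  induction e using stripLoop.induct with
  | case1 e h1 h2 =>
    exfalso
    have hdvd : (10 : Int) ∣ e := (PySem.Int.mod_eq_zero_iff_dvd e 10).mp h1
    have hfd : PySem.Int.floordiv e 10 = e / 10 := PySem.Int.floordiv_eq_ediv_of_pos (by norm_num)
    obtain ⟨c, hc⟩ := hdvd
    omega
  | case2 e h1 h2 ih =>
    have hdvd : (10 : Int) ∣ e := (PySem.Int.mod_eq_zero_iff_dvd e 10).mp h1
    have hfd : PySem.Int.floordiv e 10 = e / 10 := PySem.Int.floordiv_eq_ediv_of_pos (by norm_num)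
    obtain ⟨c, hc⟩ := hdvd
    have hc' : PySem.Int.floordiv e 10 = c := by omega
    have hcne : c ≠ 0 := by rw [hc'] at h2; exact h2
    obtain ⟨k, hk, hnd⟩ := ih (by rw [hc']; exact hcne)
    rw [hc'] at hk hnd
    have hs : stripLoop e = stripLoop c := by rw [stripLoop, if_pos h1, if_neg h2, hc']
    refine ⟨k + 1, ?_, ?_⟩
    · rw [hs, pow_succ, hc]
      conv_lhs => rw [hk]
      ring
    · rw [hs]
      exact hnd
  | case3 e h1 =>
    refine ⟨0, by rw [stripLoop, if_neg h1]; ring, ?_⟩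
    rw [stripLoop, if_neg h1]
    intro hd
    exact h1 ((PySem.Int.mod_eq_zero_iff_dvd e 10).mpr hd)

-- converse: the loop strips exactly the power of ten
theorem stripLoop_of_pow (d : Int) (hd : ¬ (10 : Int) ∣ d) (k : Nat) :
    stripLoop (d * 10 ^ k) = d := by
  induction k with
  | zero =>
    rw [stripLoop]
    have : PySem.Int.mod (d * 10 ^ 0) 10 ≠ 0 := by
      simpa [PySem.Int.mod_eq_zero_iff_dvd] using hd
    rw [if_neg this]
    ring
  | succ k ih =>
    have hdne : d ≠ 0 := fun h => hd (h ▸ dvd_zero 10)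
    have hm : PySem.Int.mod (d * 10 ^ (k + 1)) 10 = 0 := by
      rw [PySem.Int.mod_eq_zero_iff_dvd]
      exact ⟨d * 10 ^ k, by ring⟩
    rw [stripLoop, if_pos hm]
    have hfd : PySem.Int.floordiv (d * 10 ^ (k + 1)) 10 = d * 10 ^ k := by
      rw [PySem.Int.floordiv_eq_ediv_of_pos (by norm_num)]
      have : d * 10 ^ (k + 1) = (d * 10 ^ k) * 10 := by ring
      rw [this, Int.mul_ediv_cancel _ (by norm_num)]
    rw [hfd, if_neg (mul_ne_zero hdne (by positivity))]
    exact ih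

-- Source B's loop finds exactly the candidates d * 10^k, d ∈ {1,2,5}, k < n
theorem altLoop_iff (e : Int) (n : Nat) (p : Int) :
    altLoop e n p = true ↔
      ∃ k : Nat, k < n ∧ (e = 10 ^ k * p ∨ e = 2 * (10 ^ k * p) ∨ e = 5 * (10 ^ k * p)) := by
  induction n generalizing p with
  | zero => simp [altLoop]
  | succ n ih =>
    rw [altLoop]
    split_ifs with h
    · simp only [true_iff]
      exact ⟨0, Nat.succ_pos n, by simpa using h⟩
    · rw [ih]
      constructor
      · rintro ⟨k, hk, hcase⟩
        refine ⟨k + 1, by omega, ?_⟩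
        have : (10 : Int) ^ (k + 1) * p = 10 ^ k * (p * 10) := by ring
        rw [this]
        exact hcase
      · rintro ⟨k, hk, hcase⟩
        cases k with
        | zero => exact absurd (by simpa using hcase) h
        | succ k =>
          refine ⟨k, by omega, ?_⟩
          have : (10 : Int) ^ k * (p * 10) = 10 ^ (k + 1) * p := by ring
          rw [this]
          exact hcase

theorem pow_ten_le (k : Nat) (h : (10 : Int) ^ k ≤ 2147483648) : k < 10 := by
  by_contra hk
  rw [not_lt] at hk
  have h10 : (10 : Int) ^ 10 ≤ 10 ^ k := pow_le_pow_right₀ (by norm_num) hk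
  norm_num at h10
  omega

-- ===== VERDICT (by name: the statement is the Claim_ definition above) =====
theorem Display_Check_spec : Claim_equal_Display_Check := by
  intro e hDom
  unfold Spec_Display_Check Display_Check Display_Check_alt
  by_cases h5 : PySem.Int.mod e 5000 = 0
  · simp only [if_pos h5]
  · simp only [if_neg h5]
    have he0 : e ≠ 0 := by
      intro h; apply h5; rw [h]; simp
    have hbound : e ≤ 2147483648 := by
      have := hDom
      unfold Dom_Display_Check pvDomInt at this
      simp at this
      omega
    obtain ⟨k, hk, hnd⟩ := stripLoop_spec e he0
    by_cases hmem : stripLoop e = 1 ∨ stripLoop e = 2 ∨ stripLoop e = 5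
    · rw [if_pos hmem]
      symm
      rw [altLoop_iff]
      have hklt : k < 10 := by
        apply pow_ten_le
        have hpos : (1 : Int) ≤ stripLoop e := by rcases hmem with h | h | h <;> omega
        have := hk
        nlinarith [pow_pos (show (0:Int) < 10 by norm_num) k]
      refine ⟨k, hklt, ?_⟩
      rcases hmem with h | h | h <;> rw [h] at hk <;> [left; (right; left); (right; right)] <;> omega
    · rw [if_neg hmem]
      symm
      rw [Bool.eq_false_iff]
      intro habs
      rw [altLoop_iff] at habs
      obtain ⟨j, _, hcase⟩ := habs
      apply hmem
      rcases hcase with h | h | h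
      · left
        have : stripLoop e = stripLoop ((1:Int) * 10 ^ j) := by rw [show (1:Int) * 10^j = 10^j * 1 by ring, ← h]
        rw [this, stripLoop_of_pow 1 (by norm_num) j]
      · right; left
        have : stripLoop e = stripLoop ((2:Int) * 10 ^ j) := by rw [show (2:Int) * 10^j = 2 * (10^j * 1) by ring, ← h]
        rw [this, stripLoop_of_pow 2 (by norm_num) j]
      · right; right
        have : stripLoop e = stripLoop ((5:Int) * 10 ^ j) := by rw [show (5:Int) * 10^j = 5 * (10^j * 1) by ring, ← h]
        rw [this, stripLoop_of_pow 5 (by norm_num) j]
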